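-- pv_equiv track=rewrite | github.com/vishnuvardhan118/vardhan | conversions.py | bd
-- ===== SOURCE A (Python) =====
-- def bd(n):
--         a=1
--         sum=0
--         while n>0:
--                 sum+=(n%10)*a
--                 a=a*2
--                 n=n//10
--         return sum
-- ===== SOURCE B (Python) =====
-- def bd(n):
--     if n <= 0:
--         return 0
--     result = 0
--     for ch in str(n):
--         result = result * 2 + int(ch)
--     return result
-- ===== Notes on version B (the rewrite author's own statement) =====
-- stated objective: idiomatic
-- what changed: B replaces the while-loop that peels digits least-significant-first with an explicit power-of-two accumulator by a Horner evaluation over str(n), processing the decimal digits most-significant-first with a single accumulator.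
import Mathlib
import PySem

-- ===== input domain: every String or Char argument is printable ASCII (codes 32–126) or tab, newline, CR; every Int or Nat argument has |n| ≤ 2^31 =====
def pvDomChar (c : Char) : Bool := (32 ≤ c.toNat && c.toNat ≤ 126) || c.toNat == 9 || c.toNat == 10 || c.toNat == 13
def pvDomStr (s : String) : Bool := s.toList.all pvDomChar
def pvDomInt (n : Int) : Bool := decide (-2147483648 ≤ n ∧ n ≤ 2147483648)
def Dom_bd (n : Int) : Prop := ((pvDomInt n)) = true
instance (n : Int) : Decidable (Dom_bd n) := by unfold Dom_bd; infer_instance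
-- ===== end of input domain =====

-- B reads the decimal digits of n most-significant-first via str(n) and accumulates
-- their binary-weighted value with Horner's method (idiomatic single accumulator),
-- instead of A's least-significant-first peeling with a separate power-of-two counter.

-- ===== PORT A =====
-- A's while-loop: state (n, a, sum); updates sum += (n%10)*a; a *= 2; n //= 10.
def bdLoop (n a sum : Int) : Int :=
  if h : n > 0 then
    bdLoop (PySem.Int.floordiv n 10) (a * 2) (sum + PySem.Int.mod n 10 * a)
  else sum
termination_by n.toNat
decreasing_by
  rw [PySem.Int.floordiv_eq_ediv_of_pos (by norm_num)]
  omega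

def bd (n : Int) : Int := bdLoop n 1 0

-- ===== PORT B =====
-- int(ch) on a single char; B only applies it to decimal digits of str(n), where
-- Python returns a value, so the `getD 0` default is never reached.
def digVal (c : Char) : Int := (PySem.Int.ofChars? [c]).getD 0

def bd_alt (n : Int) : Int :=
  if n ≤ 0 then 0
  else (PySem.Int.toStr n).toList.foldl (fun r c => r * 2 + digVal c) 0

-- ===== PRECONDITION & SPEC =====
def Spec_bd (n : Int) (out : Int) : Prop := out = bd_alt n
instance (n : Int) (out : Int) : Decidable (Spec_bd n out) := by unfold Spec_bd; infer_instance

-- ===== CLAIM (what is proved, stated in full; the proofs are below) =====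
def Claim_equal_bd : Prop := ∀ (n : Int), Dom_bd n → Spec_bd n (bd n)

-- ===== LEMMAS AND PROOFS =====

-- The common value: decimal digits of m, weighted by powers of two (little-endian).
def binVal (m : Nat) : Int :=
  if h : m = 0 then 0
  else 2 * binVal (m / 10) + ((m % 10 : Nat) : Int)
termination_by m
decreasing_by exact Nat.div_lt_self (Nat.pos_of_ne_zero h) (by norm_num)

-- Horner over the decimal digits of m (MSB first), seeded with r.
def hornerFrom (r : Int) (m : Nat) : Int :=
  if m < 10 then r * 2 + (m : Int)
  else hornerFrom r (m / 10) * 2 + ((m % 10 : Nat) : Int)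
termination_by m
decreasing_by exact Nat.div_lt_self (by omega) (by norm_num)

lemma digVal_digitChar (d : Nat) (h : d < 10) : digVal (Nat.digitChar d) = (d : Int) := by
  interval_cases d <;> decide

lemma foldl_toDigitsCore (fuel : Nat) :
    ∀ (m : Nat) (r : Int) (ds : List Char), m < fuel →
      List.foldl (fun r c => r * 2 + digVal c) r (Nat.toDigitsCore 10 fuel m ds)
        = List.foldl (fun r c => r * 2 + digVal c) (hornerFrom r m) ds := by
  induction fuel with
  | zero => intro m r ds h; omega
  | succ fuel ih =>
    intro m r ds h
    rw [Nat.toDigitsCore]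
    by_cases h10 : m / 10 = 0
    · have hm : m < 10 := by omega
      rw [if_pos h10, List.foldl_cons, digVal_digitChar (m % 10) (by omega),
        hornerFrom, if_pos hm]
      congr 2
      omega
    · rw [if_neg h10]
      rw [ih (m / 10) r _ (by omega), List.foldl_cons,
        digVal_digitChar (m % 10) (by omega)]
      rw [show hornerFrom r m = hornerFrom r (m / 10) * 2 + ((m % 10 : Nat) : Int) by
        rw [hornerFrom, if_neg (by omega)]]

lemma hornerFrom_zero (m : Nat) : hornerFrom 0 m = binVal m := by
  induction m using Nat.strong_induction_on with
  | _ m ih =>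
    by_cases hm : m < 10
    · rw [hornerFrom, if_pos hm, binVal]
      by_cases h0 : m = 0
      · simp [h0]
      · rw [dif_neg h0, show m / 10 = 0 by omega, binVal]
        simp
        omega
    · rw [hornerFrom, if_neg hm, binVal, dif_neg (by omega),
        ih (m / 10) (Nat.div_lt_self (by omega) (by norm_num))]
      ring

lemma bdLoop_eq (n a sum : Int) : bdLoop n a sum = sum + a * binVal n.toNat := by
  induction n, a, sum using bdLoop.induct with
  | case1 n a sum h ih =>
    rw [bdLoop, dif_pos h, ih,
      PySem.Int.floordiv_eq_ediv_of_pos (by norm_num),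
      PySem.Int.mod_eq_emod_of_pos (by norm_num)]
    rw [show binVal n.toNat = 2 * binVal (n.toNat / 10) + ((n.toNat % 10 : Nat) : Int) by
      rw [binVal, dif_neg (by omega)]]
    have h1 : (n / 10).toNat = n.toNat / 10 := by omega
    have h2 : ((n.toNat % 10 : Nat) : Int) = n % 10 := by omega
    rw [h1, h2]
    ring
  | case2 n a sum h =>
    rw [bdLoop, dif_neg h, show n.toNat = 0 by omega, binVal]
    simp

lemma bd_alt_eq_binVal (n : Int) (h : 0 < n) : bd_alt n = binVal n.toNat := by
  rw [bd_alt, if_neg (by omega)]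
  have : (PySem.Int.toStr n).toList = Nat.toDigits 10 n.toNat := by
    rw [PySem.Int.toList_toStr, PySem.Int.toChars, if_neg (by omega)]
  rw [this, Nat.toDigits, foldl_toDigitsCore (n.toNat + 1) n.toNat 0 [] (by omega),
    List.foldl_nil, hornerFrom_zero]

-- ===== VERDICT (by name: the statement is the Claim_ definition above) =====
theorem bd_spec : Claim_equal_bd := by
  intro n _
  show bd n = bd_alt n
  by_cases h : 0 < n
  · rw [bd, bdLoop_eq, bd_alt_eq_binVal n h]; ring
  · rw [bd, bdLoop_eq, bd_alt, if_pos (by omega), show n.toNat = 0 by omega, binVal]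
    simp
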